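-- pv_equiv track=rewrite | github.com/volcengine/verl | atropos/environments/intern_bootcamp/internbootcamp_lib/internbootcamp/bootcamp/cphoenixandtowers/cphoenixandtowers.py | _solve_phoenix
-- ===== SOURCE A (Python) =====
-- from heapq import heapify, heappop, heappush
--
-- def _solve_phoenix(n, m, x, h):
--     """贪心算法求解器"""
--     if n == m:
--         return list(range(1, m+1))
--
--     ans = [0] * n
--     heap = [(0, i+1) for i in range(m)]
--     heapify(heap)
--
--     for i in range(n):
--         s, j = heappop(heap)
--         ans[i] = j
--         heappush(heap, (s + h[i], j))
--
--     return ans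
-- ===== SOURCE B (Python) =====
-- def _solve_phoenix(n, m, x, h):
--     """Greedy without a heap: keep a plain array of tower sums and pick the
--     smallest-sum tower (ties to the smallest index) by a linear scan."""
--     if n == m:
--         return list(range(1, m + 1))
--
--     sums = [0] * m
--     ans = []
--     for i in range(n):
--         j = 0
--         for t in range(1, m):
--             if sums[t] < sums[j]:
--                 j = t
--         ans.append(j + 1)
--         sums[j] += h[i]
--     return ans
-- ===== Notes on version B (the rewrite author's own statement) =====
-- stated objective: simpler
-- what changed: Replaced the binary heap (heapify/heappop/heappush of (sum,index) pairs) by a flat array of tower sums with a linear argmin scan (smallest sum, ties to smallest index) per block; the output list is built by appending instead of preallocating and setting.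
import Mathlib
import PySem

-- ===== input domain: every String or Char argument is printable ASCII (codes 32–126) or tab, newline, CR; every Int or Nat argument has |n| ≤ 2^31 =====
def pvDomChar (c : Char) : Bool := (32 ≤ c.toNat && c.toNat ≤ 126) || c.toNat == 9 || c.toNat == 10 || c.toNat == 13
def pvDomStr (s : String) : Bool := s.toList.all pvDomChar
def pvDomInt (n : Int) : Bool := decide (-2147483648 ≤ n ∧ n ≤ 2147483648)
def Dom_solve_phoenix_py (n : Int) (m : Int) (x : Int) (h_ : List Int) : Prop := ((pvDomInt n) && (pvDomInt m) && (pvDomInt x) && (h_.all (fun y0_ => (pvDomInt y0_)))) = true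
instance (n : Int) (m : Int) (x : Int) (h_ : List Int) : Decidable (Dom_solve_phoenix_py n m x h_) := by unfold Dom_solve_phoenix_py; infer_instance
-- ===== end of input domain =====

-- B replaces A's binary heap by a flat array of tower sums with a linear argmin scan; equal output proved on all inputs where A returns.

-- ===== PORT A =====
-- Python tuple comparison (s, j) < (s', j') — lexicographic, as heapq compares.
def pvLt (a b : Int × Int) : Bool :=
  decide (a.1 < b.1) || (decide (a.1 = b.1) && decide (a.2 < b.2))

-- heapq._siftdown(heap, startpos, pos): the bubble-up while-loop (newitem = heap[pos] is read by pvSiftdown).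
def pvSiftdownLoop (heap : List (Int × Int)) (startpos pos : Nat) (newitem : Int × Int) : List (Int × Int) :=
  if _h : startpos < pos then
    if pvLt newitem (heap.getD ((pos - 1) / 2) (0, 0)) then
      pvSiftdownLoop (heap.set pos (heap.getD ((pos - 1) / 2) (0, 0))) startpos ((pos - 1) / 2) newitem
    else heap.set pos newitem
  else heap.set pos newitem
termination_by pos
decreasing_by omega

def pvSiftdown (heap : List (Int × Int)) (startpos pos : Nat) : List (Int × Int) :=
  pvSiftdownLoop heap startpos pos (heap.getD pos (0, 0))

-- heapq._siftup's childpos selection: the smaller child of pos (right child iff it exists and left is not < right).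
def pvChild (heap : List (Int × Int)) (endpos pos : Nat) : Nat :=
  if 2 * pos + 2 < endpos ∧ pvLt (heap.getD (2 * pos + 1) (0, 0)) (heap.getD (2 * pos + 2) (0, 0)) = false
  then 2 * pos + 2 else 2 * pos + 1

-- heapq._siftup(heap, pos): descend to a leaf along the smaller child, then _siftdown.
def pvSiftupLoop (heap : List (Int × Int)) (endpos startpos pos : Nat) (newitem : Int × Int) : List (Int × Int) :=
  if _h : 2 * pos + 1 < endpos then
    pvSiftupLoop (heap.set pos (heap.getD (pvChild heap endpos pos) (0, 0))) endpos startpos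
      (pvChild heap endpos pos) newitem
  else pvSiftdown (heap.set pos newitem) startpos pos
termination_by endpos - pos
decreasing_by unfold pvChild; split <;> omega

def pvSiftup (heap : List (Int × Int)) (pos : Nat) : List (Int × Int) :=
  pvSiftupLoop heap heap.length pos pos (heap.getD pos (0, 0))

-- heapq.heapify: for i in reversed(range(n//2)): _siftup(heap, i)
def pvHeapify (heap : List (Int × Int)) : List (Int × Int) :=
  (List.range (heap.length / 2)).reverse.foldl (fun hp i => pvSiftup hp i) heap

-- heapq.heappush: append, then _siftdown(heap, 0, len(heap)-1)
def pvHeappush (heap : List (Int × Int)) (item : Int × Int) : List (Int × Int) :=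
  pvSiftdown (heap ++ [item]) 0 heap.length

-- heapq.heappop (heap nonempty under Pre_): pop last; if rest nonempty, move last to root and _siftup(heap, 0).
def pvHeappop (heap : List (Int × Int)) : (Int × Int) × List (Int × Int) :=
  if heap.dropLast.isEmpty then (heap.getLastD (0, 0), [])
  else (heap.dropLast.getD 0 (0, 0),
        pvSiftup (heap.dropLast.set 0 (heap.getLastD (0, 0))) 0)

-- the body of A's 'for i in range(n)' loop, state = (ans, heap)
def pvStepA (h_ : List Int) (st : List Int × List (Int × Int)) (i : Int) : List Int × List (Int × Int) :=
  let p := pvHeappop st.2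
  (PySem.List.pySetD st.1 i p.1.2, pvHeappush p.2 (p.1.1 + PySem.List.pyGetD h_ i 0, p.1.2))

def solve_phoenix_py (n : Int) (m : Int) (_x : Int) (h_ : List Int) : List Int :=
  if n = m then PySem.List.pyRange 1 (m + 1) 1
  else
    let ans := List.replicate n.toNat (0 : Int)
    let heap := pvHeapify ((PySem.List.pyRange 0 m 1).map (fun i => ((0 : Int), i + 1)))
    ((PySem.List.pyRange 0 n 1).foldl (pvStepA h_) (ans, heap)).1

-- ===== PORT B =====
-- the inner 'for t in range(1, m)' argmin scan of Source B (smallest sum, ties to smallest index)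
def pvScan (sums : List Int) (m : Int) : Int :=
  (PySem.List.pyRange 1 m 1).foldl
    (fun j t => if PySem.List.pyGetD sums t 0 < PySem.List.pyGetD sums j 0 then t else j) 0

-- the body of B's 'for i in range(n)' loop, state = (ans, sums)
def pvStepB (h_ : List Int) (m : Int) (st : List Int × List Int) (i : Int) : List Int × List Int :=
  let j := pvScan st.2 m
  (st.1 ++ [j + 1],
   PySem.List.pySetD st.2 j (PySem.List.pyGetD st.2 j 0 + PySem.List.pyGetD h_ i 0))

def solve_phoenix_py_alt (n : Int) (m : Int) (_x : Int) (h_ : List Int) : List Int :=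
  if n = m then PySem.List.pyRange 1 (m + 1) 1
  else
    ((PySem.List.pyRange 0 n 1).foldl (pvStepB h_ m) ([], List.replicate m.toNat (0 : Int))).1

-- ===== PRECONDITION & SPEC =====
-- Pre_ is exactly where Python A returns: with n ≠ m and n > 0, A raises IndexError
-- when m < 1 (heappop from an empty heap) or n > len(h) (reading h[i]).
def Pre_solve_phoenix_py (n : Int) (m : Int) (x : Int) (h_ : List Int) : Prop :=
  n = m ∨ n ≤ 0 ∨ (1 ≤ m ∧ n ≤ (h_.length : Int))
instance (n : Int) (m : Int) (x : Int) (h_ : List Int) : Decidable (Pre_solve_phoenix_py n m x h_) := by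
  unfold Pre_solve_phoenix_py; infer_instance

def pvWitness_solve_phoenix_py : Int × Int × Int × List Int := (3, 2, 0, [5, 1, 2])

def Spec_solve_phoenix_py (n : Int) (m : Int) (x : Int) (h_ : List Int) (out : List Int) : Prop :=
  out = solve_phoenix_py_alt n m x h_
instance (n : Int) (m : Int) (x : Int) (h_ : List Int) (out : List Int) : Decidable (Spec_solve_phoenix_py n m x h_ out) := by
  unfold Spec_solve_phoenix_py; infer_instance

-- ===== CLAIM =====
def Claim_equal_solve_phoenix_py : Prop :=
  ∀ (n : Int) (m : Int) (x : Int) (h_ : List Int),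
    Dom_solve_phoenix_py n m x h_ → Pre_solve_phoenix_py n m x h_ →
      Spec_solve_phoenix_py n m x h_ (solve_phoenix_py n m x h_)

-- ===== LEMMAS AND PROOFS =====

-- ---- generic list facts ----
theorem pv_getD_set_self {α : Type} (l : List α) (i : Nat) (v d : α) (h : i < l.length) :
    (l.set i v).getD i d = v := by
  simp [List.getD_eq_getElem?_getD, h]

theorem pv_getD_set_ne {α : Type} (l : List α) (i k : Nat) (v d : α) (h : k ≠ i) :
    (l.set i v).getD k d = l.getD k d := by
  simp [List.getD_eq_getElem?_getD, List.getElem?_set_ne (Ne.symm h)]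

theorem pv_set_getD_self {α : Type} (l : List α) (i : Nat) (d : α) (h : i < l.length) :
    l.set i (l.getD i d) = l := by
  rw [List.getD_eq_getElem l d h]; exact List.set_getElem_self ..

theorem pv_getLastD {α : Type} (l : List α) (d : α) (h : l ≠ []) : l.getLastD d = l.getLast h := by
  rw [List.getLastD_eq_getLast?, List.getLast?_eq_some_getLast h]; rfl

theorem pv_set_perm_cons_eraseIdx {α : Type} (l : List α) (k : Nat) (x : α) (h : k < l.length) :
    (l.set k x).Perm (x :: l.eraseIdx k) := by
  rw [List.set_eq_take_cons_drop x h, List.eraseIdx_eq_take_drop_succ]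
  exact List.perm_middle

theorem pv_swap_perm {α : Type} (l : List α) (i j : Nat) (d : α) (hij : i ≠ j)
    (hi : i < l.length) (hj : j < l.length) :
    ((l.set i (l.getD j d)).set j (l.getD i d)).Perm l := by
  have aux : ∀ (l : List α) (i j : Nat), i < j → j < l.length →
      ((l.set i (l.getD j d)).set j (l.getD i d)).Perm l := by
    intro l
    induction l with
    | nil => intro i j _ hj; simp at hj
    | cons x t ih =>
      intro i j hij hj
      match i, j with
      | _, 0 => omega
      | 0, j' + 1 =>
        have hj' : j' < t.length := by simpa using hj
        simp only [List.getD_cons_succ, List.getD_cons_zero, List.set_cons_zero,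
          List.set_cons_succ]
        refine (List.Perm.cons _ (pv_set_perm_cons_eraseIdx t j' x hj')).trans
          ((List.Perm.swap _ _ _).trans (List.Perm.cons _ ?_))
        rw [List.getD_eq_getElem t d hj']
        exact List.getElem_cons_eraseIdx_perm hj'
      | i' + 1, j' + 1 =>
        simp only [List.getD_cons_succ, List.set_cons_succ]
        exact List.Perm.cons _ (ih i' j' (by omega) (by simpa using hj))
  rcases Nat.lt_or_ge i j with hlt | hge
  · exact aux l i j hlt hj
  · have hgt : j < i := by omega
    rw [List.set_comm _ _ hij]
    exact aux l j i hgt hi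

-- ---- order facts about pvLt ----
theorem pvLt_irrefl (a : Int × Int) : pvLt a a = false := by
  simp [pvLt]

theorem pvLt_asymm {a b : Int × Int} (h : pvLt a b = true) : pvLt b a = false := by
  obtain ⟨a1, a2⟩ := a; obtain ⟨b1, b2⟩ := b
  simp only [pvLt, Bool.or_eq_true, Bool.and_eq_true, decide_eq_true_eq,
    Bool.or_eq_false_iff, Bool.and_eq_false_iff, decide_eq_false_iff_not] at *
  omega

theorem pvLe_trans {a b c : Int × Int} (h1 : pvLt b a = false) (h2 : pvLt c b = false) :
    pvLt c a = false := by
  obtain ⟨a1, a2⟩ := a; obtain ⟨b1, b2⟩ := b; obtain ⟨c1, c2⟩ := c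
  simp only [pvLt, Bool.or_eq_false_iff, Bool.and_eq_false_iff, decide_eq_false_iff_not] at *
  omega

theorem pvLe_antisymm {a b : Int × Int} (h1 : pvLt b a = false) (h2 : pvLt a b = false) :
    a = b := by
  obtain ⟨a1, a2⟩ := a; obtain ⟨b1, b2⟩ := b
  simp only [pvLt, Bool.or_eq_false_iff, Bool.and_eq_false_iff, decide_eq_false_iff_not] at *
  simp only [Prod.mk.injEq]
  omega

-- ---- subtree-membership (pos lies in the subtree rooted at sp) ----
def pvInSub (sp pos : Nat) : Bool :=
  if sp = pos then true
  else if pos = 0 then false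
  else if pos < sp then false
  else pvInSub sp ((pos - 1) / 2)
termination_by pos
decreasing_by omega

theorem pvInSub_self (sp : Nat) : pvInSub sp sp = true := by
  rw [pvInSub]; simp

theorem pvInSub_zero (pos : Nat) : pvInSub 0 pos = true := by
  induction pos using Nat.strong_induction_on with
  | _ pos ih =>
    rw [pvInSub]
    split
    · rfl
    · split
      · omega
      · rw [if_neg (by omega)]
        exact ih _ (by omega)

theorem pvInSub_le {sp pos : Nat} (h : pvInSub sp pos = true) : sp ≤ pos := by
  induction pos using Nat.strong_induction_on with
  | _ pos ih =>
    rw [pvInSub] at h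
    split at h
    · omega
    · split at h
      · simp at h
      · split at h
        · simp at h
        · omega

theorem pvInSub_parent {sp pos : Nat} (h : pvInSub sp pos = true) (hlt : sp < pos) :
    pvInSub sp ((pos - 1) / 2) = true := by
  rw [pvInSub] at h
  simp only [if_neg (by omega : ¬ sp = pos), if_neg (by omega : ¬ pos = 0),
    if_neg (by omega : ¬ pos < sp)] at h
  exact h

theorem pvInSub_child {sp pos c : Nat} (h : pvInSub sp pos = true) (hc : (c - 1) / 2 = pos)
    (hc0 : 0 < c) : pvInSub sp c = true := by
  have hle := pvInSub_le h
  have hcp : pos < c := by omega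
  rw [pvInSub]
  simp only [if_neg (by omega : ¬ c = 0), if_neg (by omega : ¬ c < sp)]
  split
  · rfl
  · rw [hc]; exact h

-- ---- the heap ordering predicate: every parent/child edge with parent index ≥ i is ordered ----
def pvPOrd (l : List (Int × Int)) (i : Nat) : Prop :=
  ∀ c, 0 < c → c < l.length → i ≤ (c - 1) / 2 →
    pvLt (l.getD c (0, 0)) (l.getD ((c - 1) / 2) (0, 0)) = false

theorem pv_root_min {l : List (Int × Int)} (h : pvPOrd l 0) :
    ∀ k, k < l.length → pvLt (l.getD k (0, 0)) (l.getD 0 (0, 0)) = false := by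
  intro k
  induction k using Nat.strong_induction_on with
  | _ k ih =>
    intro hk
    rcases Nat.eq_zero_or_pos k with hk0 | hk0
    · subst hk0; exact pvLt_irrefl _
    · exact pvLe_trans (ih ((k - 1) / 2) (by omega) (by omega)) (h k hk0 hk (by omega))

-- ---- correctness of _siftdown's loop ----
theorem pvSiftdownLoop_spec :
    ∀ (pos : Nat) (heap : List (Int × Int)) (sp : Nat) (newitem : Int × Int),
      pos < heap.length → pvInSub sp pos = true →
      (∀ c, 0 < c → c < heap.length → sp ≤ (c - 1) / 2 → c ≠ pos →
        pvLt ((heap.set pos newitem).getD c (0, 0))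
             ((heap.set pos newitem).getD ((c - 1) / 2) (0, 0)) = false) →
      (sp < pos → ∀ c, 0 < c → c < heap.length → (c - 1) / 2 = pos →
        pvLt ((heap.set pos newitem).getD c (0, 0))
             ((heap.set pos newitem).getD ((pos - 1) / 2) (0, 0)) = false) →
      (pvSiftdownLoop heap sp pos newitem).Perm (heap.set pos newitem) ∧
      (pvSiftdownLoop heap sp pos newitem).length = heap.length ∧
      pvPOrd (pvSiftdownLoop heap sp pos newitem) sp := by
  intro pos
  induction pos using Nat.strong_induction_on with
  | _ pos ih =>
    intro heap sp newitem hpos hsub ha hb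
    have hsple : sp ≤ pos := pvInSub_le hsub
    set A := heap.set pos newitem with hA
    have hApos : A.getD pos (0, 0) = newitem := pv_getD_set_self _ _ _ _ hpos
    have hAother : ∀ k, k ≠ pos → A.getD k (0, 0) = heap.getD k (0, 0) :=
      fun k hk => pv_getD_set_ne _ _ _ _ _ hk
    rw [pvSiftdownLoop]
    by_cases h1 : sp < pos
    · rw [dif_pos h1]
      set pp := (pos - 1) / 2 with hpp
      have hpplt : pp < pos := by omega
      have hppne : pp ≠ pos := by omega
      have hpplen : pp < heap.length := by omega
      set pval := heap.getD pp (0, 0) with hpv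
      by_cases h2 : pvLt newitem pval = true
      · rw [if_pos h2]
        set A' := (heap.set pos pval).set pp newitem with hA'
        have hA'pp : A'.getD pp (0, 0) = newitem := pv_getD_set_self _ _ _ _ (by simpa using hpplen)
        have hA'pos : A'.getD pos (0, 0) = pval := by
          rw [pv_getD_set_ne _ _ _ _ _ (Ne.symm hppne)]
          exact pv_getD_set_self _ _ _ _ hpos
        have hA'other : ∀ k, k ≠ pp → k ≠ pos → A'.getD k (0, 0) = heap.getD k (0, 0) := by
          intro k hk1 hk2
          rw [pv_getD_set_ne _ _ _ _ _ hk1, pv_getD_set_ne _ _ _ _ _ hk2]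
        have ha' : ∀ c, 0 < c → c < (heap.set pos pval).length → sp ≤ (c - 1) / 2 → c ≠ pp →
            pvLt (A'.getD c (0, 0)) (A'.getD ((c - 1) / 2) (0, 0)) = false := by
          intro c hc0 hclen hcsp hcpp
          have hclen' : c < heap.length := by simpa using hclen
          by_cases hcpos : c = pos
          · subst hcpos
            rw [← hpp, hA'pos, hA'pp]
            exact pvLt_asymm h2
          · by_cases hpar : (c - 1) / 2 = pos
            · rw [hA'other c hcpp hcpos, hpar, hA'pos]
              have h4 := hb h1 c hc0 hclen' hpar
              rw [hAother c hcpos, hAother pp hppne, ← hpv] at h4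
              exact h4
            · by_cases hpar2 : (c - 1) / 2 = pp
              · rw [hA'other c hcpp hcpos, hpar2, hA'pp]
                have h3 : pvLt pval newitem = false := pvLt_asymm h2
                have h4 := ha c hc0 hclen' hcsp hcpos
                rw [hAother c hcpos, hpar2, hAother pp hppne, ← hpv] at h4
                exact pvLe_trans h3 h4
              · rw [hA'other c hcpp hcpos, hA'other _ hpar2 hpar]
                have h4 := ha c hc0 hclen' hcsp hcpos
                rw [hAother c hcpos, hAother _ hpar] at h4
                exact h4
        have hsub' : pvInSub sp pp = true := pvInSub_parent hsub h1
        have hb' : sp < pp → ∀ c, 0 < c → c < (heap.set pos pval).length → (c - 1) / 2 = pp →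
            pvLt (A'.getD c (0, 0)) (A'.getD ((pp - 1) / 2) (0, 0)) = false := by
          intro hsppp c hc0 hclen hcpar
          have hclen' : c < heap.length := by simpa using hclen
          have hpp1 : 0 < pp := by omega
          have hppplt : (pp - 1) / 2 < pp := by omega
          have hpppne_pos : (pp - 1) / 2 ≠ pos := by omega
          have hpppne_pp : (pp - 1) / 2 ≠ pp := by omega
          have hspppp : sp ≤ (pp - 1) / 2 := pvInSub_le (pvInSub_parent hsub' hsppp)
          have hppA := ha pp hpp1 (by omega) hspppp hppne
          rw [hAother pp hppne, ← hpv, hAother _ hpppne_pos] at hppA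
          rw [hA'other _ hpppne_pp hpppne_pos]
          by_cases hcpos : c = pos
          · subst hcpos
            rw [hA'pos]
            exact hppA
          · have hcppne : c ≠ pp := by omega
            rw [hA'other c hcppne hcpos]
            have h4 := ha c hc0 hclen' (by omega) hcpos
            rw [hAother c hcpos, hcpar, hAother pp hppne, ← hpv] at h4
            exact pvLe_trans hppA h4
        obtain ⟨p1, p2, p3⟩ := ih pp hpplt (heap.set pos pval) sp newitem
          (by simpa using hpplen) hsub' ha' hb'
        refine ⟨?_, ?_, ?_⟩
        · have hswap := pv_swap_perm A pos pp (0, 0) (Ne.symm hppne)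
            (by simpa [hA] using hpos) (by simpa [hA] using hpplen)
          rw [hApos, hAother pp hppne, ← hpv] at hswap
          have hset : A.set pos pval = heap.set pos pval := by rw [hA, List.set_set]
          rw [hset] at hswap
          exact p1.trans hswap
        · rw [p2]; simp
        · exact p3
      · rw [if_neg h2]
        have h2' : pvLt newitem pval = false := by simpa using h2
        refine ⟨List.Perm.refl _, by simp, ?_⟩
        intro c hc0 hclen hcsp
        have hclen' : c < heap.length := by simpa [hA] using hclen
        by_cases hcpos : c = pos
        · subst hcpos
          rw [← hpp, hApos, hAother pp hppne, ← hpv]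
          exact h2'
        · exact ha c hc0 hclen' hcsp hcpos
    · rw [dif_neg h1]
      have hps : pos = sp := by omega
      refine ⟨List.Perm.refl _, by simp, ?_⟩
      intro c hc0 hclen hcsp
      have hclen' : c < heap.length := by simpa [hA] using hclen
      by_cases hcpos : c = pos
      · exact absurd hcsp (by omega)
      · exact ha c hc0 hclen' hcsp hcpos

-- ---- the chosen child is a child, and is minimal among pos's children ----
theorem pvChild_spec (heap : List (Int × Int)) (endpos pos : Nat) (h : 2 * pos + 1 < endpos) :
    pvChild heap endpos pos < endpos ∧ (pvChild heap endpos pos - 1) / 2 = pos ∧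
    pos < pvChild heap endpos pos ∧
    ∀ c, 0 < c → c < endpos → (c - 1) / 2 = pos →
      pvLt (heap.getD c (0, 0)) (heap.getD (pvChild heap endpos pos) (0, 0)) = false := by
  unfold pvChild
  split
  · rename_i hcond
    refine ⟨by omega, by omega, by omega, ?_⟩
    intro c hc0 hclen hcpar
    have : c = 2 * pos + 1 ∨ c = 2 * pos + 2 := by omega
    rcases this with rfl | rfl
    · exact hcond.2
    · exact pvLt_irrefl _
  · rename_i hcond
    refine ⟨by omega, by omega, by omega, ?_⟩
    intro c hc0 hclen hcpar
    have : c = 2 * pos + 1 ∨ c = 2 * pos + 2 := by omega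
    rcases this with rfl | rfl
    · exact pvLt_irrefl _
    · cases h2 : pvLt (heap.getD (2 * pos + 1) (0, 0)) (heap.getD (2 * pos + 2) (0, 0)) with
      | false => exact absurd ⟨by omega, h2⟩ hcond
      | true => exact pvLt_asymm h2

-- ---- correctness of _siftup's loop ----
theorem pvSiftupLoop_spec :
    ∀ (fuel : Nat) (pos : Nat) (heap : List (Int × Int)) (endpos sp : Nat) (newitem : Int × Int),
      endpos - pos ≤ fuel →
      endpos = heap.length → pos < endpos → pvInSub sp pos = true →
      (∀ c, 0 < c → c < endpos → sp ≤ (c - 1) / 2 → (c - 1) / 2 ≠ pos →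
        pvLt (heap.getD c (0, 0)) (heap.getD ((c - 1) / 2) (0, 0)) = false) →
      (sp < pos → ∀ c, 0 < c → c < endpos → (c - 1) / 2 = pos →
        pvLt (heap.getD c (0, 0)) (heap.getD pos (0, 0)) = false) →
      (pvSiftupLoop heap endpos sp pos newitem).Perm (heap.set pos newitem) ∧
      (pvSiftupLoop heap endpos sp pos newitem).length = heap.length ∧
      pvPOrd (pvSiftupLoop heap endpos sp pos newitem) sp := by
  intro fuel
  induction fuel with
  | zero => intro pos heap endpos sp newitem hfuel _ hpos; omega
  | succ fuel ih =>
    intro pos heap endpos sp newitem hfuel hend hpos hsub hI1a hI1b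
    have hsple : sp ≤ pos := pvInSub_le hsub
    rw [pvSiftupLoop]
    by_cases hleaf : 2 * pos + 1 < endpos
    · rw [dif_pos hleaf]
      obtain ⟨hclt, hcpar, hcgt, hcmin⟩ := pvChild_spec heap endpos pos hleaf
      set ch := pvChild heap endpos pos with hch
      set heap' := heap.set pos (heap.getD ch (0, 0)) with hH
      have hH'get : ∀ k, k ≠ pos → heap'.getD k (0, 0) = heap.getD k (0, 0) :=
        fun k hk => pv_getD_set_ne _ _ _ _ _ hk
      have hH'pos : heap'.getD pos (0, 0) = heap.getD ch (0, 0) :=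
        pv_getD_set_self _ _ _ _ (by omega)
      have hI1a' : ∀ c, 0 < c → c < endpos → sp ≤ (c - 1) / 2 → (c - 1) / 2 ≠ ch →
          pvLt (heap'.getD c (0, 0)) (heap'.getD ((c - 1) / 2) (0, 0)) = false := by
        intro c hc0 hclen hcsp hcch
        by_cases hcpos : c = pos
        · subst hcpos
          have hppne : (c - 1) / 2 ≠ c := by omega
          rw [hH'pos, hH'get _ hppne]
          have hsplt : sp < c := by omega
          have e1 := hI1a c hc0 hclen hcsp (by omega)
          have e2 := hI1b hsplt ch (by omega) hclt hcpar
          exact pvLe_trans e1 e2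
        · by_cases hpar : (c - 1) / 2 = pos
          · rw [hH'get c hcpos, hpar, hH'pos]
            by_cases hcch2 : c = ch
            · subst hcch2; exact pvLt_irrefl _
            · exact hcmin c hc0 hclen hpar
          · rw [hH'get c hcpos, hH'get _ hpar]
            exact hI1a c hc0 hclen hcsp hpar
      have hI1b' : sp < ch → ∀ c, 0 < c → c < endpos → (c - 1) / 2 = ch →
          pvLt (heap'.getD c (0, 0)) (heap'.getD ch (0, 0)) = false := by
        intro _ c hc0 hclen hcpar
        have hcgtch : ch < c := by omega
        rw [hH'get c (by omega), hH'get ch (by omega)]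
        have h4 := hI1a c hc0 hclen (by omega) (by omega)
        rw [hcpar] at h4
        exact h4
      obtain ⟨p1, p2, p3⟩ := ih ch heap' endpos sp newitem (by omega)
        (by simp [hH, hend]) hclt (pvInSub_child hsub hcpar (by omega)) hI1a' hI1b'
      refine ⟨?_, by simpa [hH] using p2, p3⟩
      set M := heap.set pos newitem with hM
      have hMch : M.getD ch (0, 0) = heap.getD ch (0, 0) :=
        pv_getD_set_ne _ _ _ _ _ (by omega)
      have hMpos : M.getD pos (0, 0) = newitem := pv_getD_set_self _ _ _ _ (by omega)
      have hswap := pv_swap_perm M pos ch (0, 0) (by omega)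
        (by simp [hM]; omega) (by simp [hM]; omega)
      rw [hMch, hMpos] at hswap
      have hset : M.set pos (heap.getD ch (0, 0)) = heap' := by rw [hM, List.set_set]
      rw [hset] at hswap
      exact p1.trans hswap
    · rw [dif_neg hleaf]
      unfold pvSiftdown
      rw [pv_getD_set_self _ _ _ _ (by omega)]
      have hset2 : (heap.set pos newitem).set pos newitem = heap.set pos newitem :=
        List.set_set ..
      have ha : ∀ c, 0 < c → c < (heap.set pos newitem).length → sp ≤ (c - 1) / 2 → c ≠ pos →
          pvLt (((heap.set pos newitem).set pos newitem).getD c (0, 0))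
               (((heap.set pos newitem).set pos newitem).getD ((c - 1) / 2) (0, 0)) = false := by
        intro c hc0 hclen hcsp hcpos
        have hclen' : c < endpos := by simpa [hend] using hclen
        have hparpos : (c - 1) / 2 ≠ pos := by omega
        rw [hset2, pv_getD_set_ne _ _ _ _ _ hcpos, pv_getD_set_ne _ _ _ _ _ hparpos]
        exact hI1a c hc0 hclen' hcsp hparpos
      have hb : sp < pos → ∀ c, 0 < c → c < (heap.set pos newitem).length → (c - 1) / 2 = pos →
          pvLt (((heap.set pos newitem).set pos newitem).getD c (0, 0))
               (((heap.set pos newitem).set pos newitem).getD ((pos - 1) / 2) (0, 0)) = false := by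
        intro _ c hc0 hclen hcpar
        have : c < endpos := by simpa [hend] using hclen
        omega
      obtain ⟨p1, p2, p3⟩ := pvSiftdownLoop_spec pos (heap.set pos newitem) sp newitem
        (by simp; omega) hsub ha hb
      rw [hset2] at p1
      exact ⟨p1, by simpa using p2, p3⟩

theorem pvSiftup_spec (heap : List (Int × Int)) (i : Nat) (hi : i < heap.length)
    (h : pvPOrd heap (i + 1)) :
    (pvSiftup heap i).Perm heap ∧ (pvSiftup heap i).length = heap.length ∧
      pvPOrd (pvSiftup heap i) i := by
  have hI1a : ∀ c, 0 < c → c < heap.length → i ≤ (c - 1) / 2 → (c - 1) / 2 ≠ i →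
      pvLt (heap.getD c (0, 0)) (heap.getD ((c - 1) / 2) (0, 0)) = false := by
    intro c hc0 hclen hcsp hne
    exact h c hc0 hclen (by omega)
  have hI1b : i < i → ∀ c, 0 < c → c < heap.length → (c - 1) / 2 = i →
      pvLt (heap.getD c (0, 0)) (heap.getD i (0, 0)) = false := by omega
  obtain ⟨p1, p2, p3⟩ := pvSiftupLoop_spec heap.length i heap heap.length i
    (heap.getD i (0, 0)) (by omega) rfl hi (pvInSub_self i) hI1a hI1b
  rw [pv_set_getD_self _ _ _ hi] at p1
  exact ⟨p1, p2, p3⟩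

theorem pvHeapifyAux (k : Nat) :
    ∀ (heap : List (Int × Int)), k ≤ heap.length → pvPOrd heap k →
    ((List.range k).reverse.foldl (fun hp i => pvSiftup hp i) heap).Perm heap ∧
    ((List.range k).reverse.foldl (fun hp i => pvSiftup hp i) heap).length = heap.length ∧
    pvPOrd ((List.range k).reverse.foldl (fun hp i => pvSiftup hp i) heap) 0 := by
  induction k with
  | zero => intro heap _ h0; exact ⟨List.Perm.refl _, rfl, h0⟩
  | succ k ih =>
    intro heap hk hord
    have hstep : (List.range (k + 1)).reverse = k :: (List.range k).reverse := by
      simp [List.range_succ]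
    rw [hstep, List.foldl_cons]
    obtain ⟨q1, q2, q3⟩ := pvSiftup_spec heap k (by omega) hord
    obtain ⟨p1, p2, p3⟩ := ih (pvSiftup heap k) (by omega) q3
    exact ⟨p1.trans q1, by omega, p3⟩

theorem pvHeapify_spec (heap : List (Int × Int)) :
    (pvHeapify heap).Perm heap ∧ (pvHeapify heap).length = heap.length ∧
      pvPOrd (pvHeapify heap) 0 := by
  refine pvHeapifyAux (heap.length / 2) heap (by omega) ?_
  intro c hc0 hclen hguard
  omega

theorem pvHeappop_spec (heap : List (Int × Int)) (hne : heap ≠ []) (h : pvPOrd heap 0) :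
    (pvHeappop heap).1 = heap.getD 0 (0, 0) ∧
    heap.Perm ((pvHeappop heap).1 :: (pvHeappop heap).2) ∧
    (pvHeappop heap).2.length = heap.length - 1 ∧
    pvPOrd (pvHeappop heap).2 0 := by
  by_cases hlen1 : heap.length = 1
  · obtain ⟨a, rfl⟩ := List.length_eq_one_iff.mp hlen1
    refine ⟨by simp [pvHeappop], by simp [pvHeappop], by simp [pvHeappop], ?_⟩
    intro c hc0 hclen _
    simp [pvHeappop] at hclen
  · have h0 : heap.length ≠ 0 := fun hz => hne (List.length_eq_zero_iff.mp hz)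
    have hlen2 : 2 ≤ heap.length := by omega
    set L := heap.getLastD (0, 0) with hL
    set D := heap.dropLast with hD
    have hDlen : D.length = heap.length - 1 := by simp [hD]
    have hD0 : 0 < D.length := by omega
    have hDne : D ≠ [] := fun hh => by simp [hh] at hDlen; omega
    have hsplit : D ++ [L] = heap := by
      rw [hD, hL, pv_getLastD heap (0, 0) hne]
      exact List.dropLast_concat_getLast hne
    have hgetD : ∀ k, k < D.length → heap.getD k (0, 0) = D.getD k (0, 0) := by
      intro k hk
      rw [← hsplit, List.getD_append _ _ _ _ hk]
    have hie : D.isEmpty = false := by simp [hDne]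
    have hpop : pvHeappop heap = (D.getD 0 (0, 0), pvSiftup (D.set 0 L) 0) := by
      rw [pvHeappop, ← hD, ← hL, hie]
      simp
    have hord1 : pvPOrd (D.set 0 L) 1 := by
      intro c hc0 hclen hguard
      have hc3 : 3 ≤ c := by omega
      have hclen' : c < D.length := by simpa using hclen
      rw [pv_getD_set_ne _ _ _ _ _ (by omega), pv_getD_set_ne _ _ _ _ _ (by omega),
        ← hgetD c hclen', ← hgetD _ (by omega)]
      exact h c hc0 (by omega) (by omega)
    obtain ⟨q1, q2, q3⟩ := pvSiftup_spec (D.set 0 L) 0 (by simpa using hD0) hord1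
    refine ⟨?_, ?_, ?_, ?_⟩
    · rw [hpop]
      exact (hgetD 0 hD0).symm
    · rw [hpop]
      have hDgetE : D.getD 0 (0, 0) = D[0] := List.getD_eq_getElem D (0, 0) hD0
      have e1 : heap.Perm (L :: D) := by
        rw [← hsplit]; exact List.perm_append_singleton L D
      have e2 : D.Perm (D[0] :: D.eraseIdx 0) := (List.getElem_cons_eraseIdx_perm hD0).symm
      have e3 : heap.Perm (D[0] :: L :: D.eraseIdx 0) :=
        (e1.trans (List.Perm.cons L e2)).trans (List.Perm.swap _ _ _)
      have e4 : (pvSiftup (D.set 0 L) 0).Perm (L :: D.eraseIdx 0) :=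
        q1.trans (pv_set_perm_cons_eraseIdx D 0 L hD0)
      rw [hDgetE]
      exact e3.trans (List.Perm.cons _ e4.symm)
    · rw [hpop]
      simp only [q2, List.length_set]
      omega
    · rw [hpop]
      exact q3

theorem pvHeappush_spec (heap : List (Int × Int)) (item : Int × Int) (h : pvPOrd heap 0) :
    (pvHeappush heap item).Perm (item :: heap) ∧
    (pvHeappush heap item).length = heap.length + 1 ∧
    pvPOrd (pvHeappush heap item) 0 := by
  have hget_last : (heap ++ [item]).getD heap.length (0, 0) = item := by
    rw [List.getD_eq_getElem _ _ (by simp), List.getElem_append_right (Nat.le_refl _)]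
    simp
  have hfix : (heap ++ [item]).set heap.length item = heap ++ [item] := by
    have hh := pv_set_getD_self (heap ++ [item]) heap.length (0, 0) (by simp)
    rw [hget_last] at hh
    exact hh
  have ha : ∀ c, 0 < c → c < (heap ++ [item]).length → 0 ≤ (c - 1) / 2 → c ≠ heap.length →
      pvLt (((heap ++ [item]).set heap.length item).getD c (0, 0))
           (((heap ++ [item]).set heap.length item).getD ((c - 1) / 2) (0, 0)) = false := by
    intro c hc0 hclen _ hcne
    have hclen' : c < heap.length := by simp at hclen; omega
    rw [hfix, List.getD_append _ _ _ _ hclen', List.getD_append _ _ _ _ (by omega)]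
    exact h c hc0 hclen' (by omega)
  have hb : 0 < heap.length → ∀ c, 0 < c → c < (heap ++ [item]).length →
      (c - 1) / 2 = heap.length →
      pvLt (((heap ++ [item]).set heap.length item).getD c (0, 0))
           (((heap ++ [item]).set heap.length item).getD ((heap.length - 1) / 2) (0, 0)) = false := by
    intro _ c hc0 hclen hcpar
    simp at hclen
    omega
  obtain ⟨p1, p2, p3⟩ := pvSiftdownLoop_spec heap.length (heap ++ [item]) 0 item
    (by simp) (pvInSub_zero _) ha hb
  rw [hfix] at p1
  have hunf : pvHeappush heap item =
      pvSiftdownLoop (heap ++ [item]) 0 heap.length item := by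
    rw [pvHeappush, pvSiftdown, hget_last]
  rw [hunf]
  refine ⟨p1.trans (List.perm_append_singleton item heap), by simpa using p2, p3⟩

-- ---- the argmin scan of B ----
def pvGood (sums : List Int) (j t : Int) : Prop :=
  PySem.List.pyGetD sums j 0 < PySem.List.pyGetD sums t 0 ∨
  (PySem.List.pyGetD sums j 0 = PySem.List.pyGetD sums t 0 ∧ j ≤ t)

theorem pvScanAux (sums : List Int) (m : Int) :
    ∀ (k : Nat) (a j0 : Int), m - a ≤ (k : Int) → 0 ≤ j0 → j0 < a → a ≤ m →
    (∀ t : Int, 0 ≤ t → t < a → pvGood sums j0 t) →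
    0 ≤ ((PySem.List.pyRange a m 1).foldl
        (fun j t => if PySem.List.pyGetD sums t 0 < PySem.List.pyGetD sums j 0 then t else j) j0) ∧
    ((PySem.List.pyRange a m 1).foldl
        (fun j t => if PySem.List.pyGetD sums t 0 < PySem.List.pyGetD sums j 0 then t else j) j0) < m ∧
    ∀ t : Int, 0 ≤ t → t < m → pvGood sums
      ((PySem.List.pyRange a m 1).foldl
        (fun j t => if PySem.List.pyGetD sums t 0 < PySem.List.pyGetD sums j 0 then t else j) j0) t := by
  intro k
  induction k with
  | zero =>
    intro a j0 hk h0 hja ham hgood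
    have ham' : a = m := by omega
    rw [PySem.List.pyRange_one_eq_nil (by omega), List.foldl_nil]
    exact ⟨h0, by omega, fun t ht0 htm => hgood t ht0 (by omega)⟩
  | succ k ih =>
    intro a j0 hk h0 hja ham hgood
    by_cases hlt : a < m
    · rw [PySem.List.pyRange_one_cons hlt, List.foldl_cons]
      by_cases hc : PySem.List.pyGetD sums a 0 < PySem.List.pyGetD sums j0 0
      · rw [if_pos hc]
        refine ih (a + 1) a (by omega) (by omega) (by omega) (by omega) ?_
        intro t ht0 hta
        by_cases hteq : t = a
        · subst hteq
          exact Or.inr ⟨rfl, le_refl _⟩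
        · rcases hgood t ht0 (by omega) with hl | ⟨heq, _⟩
          · exact Or.inl (by omega)
          · exact Or.inl (by omega)
      · rw [if_neg hc]
        refine ih (a + 1) j0 (by omega) h0 (by omega) (by omega) ?_
        intro t ht0 hta
        by_cases hteq : t = a
        · subst hteq
          rcases lt_or_eq_of_le (by omega : PySem.List.pyGetD sums j0 0 ≤ PySem.List.pyGetD sums t 0) with hl | he
          · exact Or.inl hl
          · exact Or.inr ⟨he, by omega⟩
        · exact hgood t ht0 (by omega)
    · have ham' : a = m := by omega
      rw [PySem.List.pyRange_one_eq_nil (by omega), List.foldl_nil]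
      exact ⟨h0, by omega, fun t ht0 htm => hgood t ht0 (by omega)⟩

theorem pvScan_spec (sums : List Int) (m : Int) (hm : 1 ≤ m) :
    0 ≤ pvScan sums m ∧ pvScan sums m < m ∧
    ∀ t : Int, 0 ≤ t → t < m → pvGood sums (pvScan sums m) t := by
  have hbase : ∀ t : Int, 0 ≤ t → t < 1 → pvGood sums 0 t := by
    intro t ht0 ht1
    have : t = 0 := by omega
    subst this
    exact Or.inr ⟨rfl, le_refl _⟩
  exact pvScanAux sums m (m - 1).toNat 1 0 (by omega) (by omega) (by omega) hm hbase

-- ---- the abstract tower state: the heap's contents as a function of the sums array ----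
def pvM (sums : List Int) : List (Int × Int) :=
  (List.range sums.length).map (fun t => (sums.getD t 0, (t : Int) + 1))

theorem pvM_length (sums : List Int) : (pvM sums).length = sums.length := by simp [pvM]

theorem pvM_getElem (sums : List Int) (t : Nat) (h : t < sums.length) :
    (pvM sums)[t]'(by simpa [pvM] using h) = (sums.getD t 0, (t : Int) + 1) := by
  simp [pvM]

theorem pvM_mem (sums : List Int) {e : Int × Int} (he : e ∈ pvM sums) :
    ∃ t, t < sums.length ∧ e = (sums.getD t 0, (t : Int) + 1) := by
  simp only [pvM, List.mem_map, List.mem_range] at he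
  obtain ⟨t, ht, heq⟩ := he
  exact ⟨t, ht, heq.symm⟩

theorem pvM_set (sums : List Int) (j : Nat) (v : Int) (hj : j < sums.length) :
    pvM (sums.set j v) = (pvM sums).set j (v, (j : Int) + 1) := by
  apply List.ext_getElem
  · simp [pvM]
  · intro t h1 h2
    have hlt : t < sums.length := by simpa [pvM] using h1
    by_cases htj : t = j
    · subst htj
      simp [pvM, hj]
    · have hjt : j ≠ t := fun hh => htj (Eq.symm hh)
      have h1' : (sums.set j v)[t]? = sums[t]? := List.getElem?_set_ne hjt
      simp [pvM, h1', hjt]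

theorem pv_root_min_mem (l : List (Int × Int)) (hord : pvPOrd l 0) {y : Int × Int}
    (hy : y ∈ l) : pvLt y (l.getD 0 (0, 0)) = false := by
  obtain ⟨k, hk, rfl⟩ := List.mem_iff_getElem.mp hy
  have hh := pv_root_min hord k hk
  rwa [List.getD_eq_getElem l (0, 0) hk] at hh

-- ---- the two partial loop states after k iterations ----
def pvA (h_ : List Int) (n m : Int) (k : Nat) : List Int × List (Int × Int) :=
  (List.range k).foldl (fun st (t : Nat) => pvStepA h_ st (t : Int))
    (List.replicate n.toNat (0 : Int),
     pvHeapify ((PySem.List.pyRange 0 m 1).map (fun i => ((0 : Int), i + 1))))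

def pvB (h_ : List Int) (m : Int) (k : Nat) : List Int × List Int :=
  (List.range k).foldl (fun st (t : Nat) => pvStepB h_ m st (t : Int))
    ([], List.replicate m.toNat (0 : Int))

theorem pvA_succ (h_ : List Int) (n m : Int) (k : Nat) :
    pvA h_ n m (k + 1) = pvStepA h_ (pvA h_ n m k) (k : Int) := by
  rw [pvA, pvA, List.range_succ, List.foldl_append, List.foldl_cons, List.foldl_nil]

theorem pvB_succ (h_ : List Int) (m : Int) (k : Nat) :
    pvB h_ m (k + 1) = pvStepB h_ m (pvB h_ m k) (k : Int) := by
  rw [pvB, pvB, List.range_succ, List.foldl_append, List.foldl_cons, List.foldl_nil]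

theorem pv_loop (n m : Int) (h_ : List Int) (hm : 1 ≤ m) :
    ∀ k, k ≤ n.toNat →
    (pvA h_ n m k).1 = (pvB h_ m k).1 ++ List.replicate (n.toNat - k) (0 : Int) ∧
    (pvB h_ m k).1.length = k ∧
    (pvB h_ m k).2.length = m.toNat ∧
    (pvA h_ n m k).2.Perm (pvM (pvB h_ m k).2) ∧
    pvPOrd (pvA h_ n m k).2 0 := by
  intro k
  induction k with
  | zero =>
    intro _
    obtain ⟨q1, q2, q3⟩ := pvHeapify_spec ((PySem.List.pyRange 0 m 1).map (fun i => ((0 : Int), i + 1)))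
    have hL0 : (PySem.List.pyRange 0 m 1).map (fun i => ((0 : Int), i + 1)) =
        pvM (List.replicate m.toNat (0 : Int)) := by
      rw [PySem.List.pyRange_one, List.map_map, pvM]
      simp only [List.length_replicate, Int.sub_zero]
      apply List.map_congr_left
      intro t ht
      rw [List.mem_range] at ht
      simp
    refine ⟨by simp [pvA, pvB], by simp [pvB], by simp [pvB], ?_, ?_⟩
    · simp only [pvA, pvB, List.range_zero, List.foldl_nil]
      rw [← hL0]
      exact q1
    · simp only [pvA, List.range_zero, List.foldl_nil]
      exact q3
  | succ k ih =>
    intro hk1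
    obtain ⟨i1, i2, i3, i4, i5⟩ := ih (by omega)
    set sA := pvA h_ n m k
    set sB := pvB h_ m k
    set heap := sA.2 with hheap
    set sums := sB.2 with hsums
    set ansA := sA.1 with hansA
    set ansB := sB.1 with hansB
    have hheaplen : heap.length = m.toNat := by rw [i4.length_eq, pvM_length, i3]
    have hne : heap ≠ [] := by
      intro hh
      rw [hh] at hheaplen
      simp at hheaplen
      omega
    obtain ⟨e1, e2, e3, e4⟩ := pvHeappop_spec heap hne i5
    obtain ⟨s1, s2, s3⟩ := pvScan_spec sums m hm
    set j := pvScan sums m with hj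
    set j' := j.toNat with hj'
    have hjj : (j' : Int) = j := Int.toNat_of_nonneg s1
    have hj'lt : j' < sums.length := by omega
    set e := heap.getD 0 (0, 0) with he
    set ej := (sums.getD j' 0, (j' : Int) + 1) with hej
    have hejM : ej ∈ pvM sums := by
      rw [hej, ← pvM_getElem sums j' hj'lt]
      exact List.getElem_mem _
    have hpyj : PySem.List.pyGetD sums j 0 = sums.getD j' 0 := by
      rw [← hjj]
      simp
    have hmin_ej : ∀ y ∈ pvM sums, pvLt y ej = false := by
      intro y hy
      obtain ⟨t, ht, rfl⟩ := pvM_mem sums hy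
      have hg := s3 (t : Int) (by omega) (by omega)
      unfold pvGood at hg
      rw [hpyj, PySem.List.pyGetD_natCast] at hg
      rw [hej]
      simp only [pvLt, Bool.or_eq_false_iff, Bool.and_eq_false_iff, decide_eq_false_iff_not]
      omega
    have heheap : e ∈ heap := by
      rw [he, List.getD_eq_getElem heap (0, 0) (by omega)]
      exact List.getElem_mem _
    have h2 : pvLt e ej = false := hmin_ej e (i4.subset heheap)
    have h1 : pvLt ej e = false := pv_root_min_mem heap i5 (i4.mem_iff.mpr hejM)
    have heej : e = ej := pvLe_antisymm h1 h2
    have hpop1 : (pvHeappop heap).1 = ej := e1.trans heej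
    rw [pvA_succ, pvB_succ]
    rw [hpop1] at e2
    set hv := PySem.List.pyGetD h_ (k : Int) 0 with hhv
    set R := (pvHeappop heap).2 with hR
    set np := (ej.1 + hv, ej.2) with hnp
    have hstepA : pvStepA h_ sA (k : Int) =
        (PySem.List.pySetD ansA (k : Int) ej.2, pvHeappush R np) := by
      rw [pvStepA, hpop1]
    have hstepB : pvStepB h_ m sB (k : Int) =
        (ansB ++ [j + 1], PySem.List.pySetD sums j (PySem.List.pyGetD sums j 0 + hv)) := by
      rw [pvStepB, ← hj]
    rw [hstepA, hstepB]
    have hsums' : PySem.List.pySetD sums j (PySem.List.pyGetD sums j 0 + hv) =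
        sums.set j' (sums.getD j' 0 + hv) := by
      rw [PySem.List.pySetD_of_nonneg _ _ s1, hpyj, ← hj']
    obtain ⟨u1, u2, u3⟩ := pvHeappush_spec R np e4
    refine ⟨?_, ?_, ?_, ?_, ?_⟩
    · show PySem.List.pySetD ansA (k : Int) ej.2 = _
      rw [PySem.List.pySetD_natCast, i1, List.set_append_right _ _ (by omega), i2]
      have hrep : List.replicate (n.toNat - k) (0 : Int) =
          (0 : Int) :: List.replicate (n.toNat - (k + 1)) (0 : Int) := by
        have : n.toNat - k = (n.toNat - (k + 1)) + 1 := by omega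
        rw [this, List.replicate_succ]
      rw [hrep]
      simp only [Nat.sub_self, List.set_cons_zero, List.append_assoc, List.cons_append,
        List.nil_append]
      have hej2 : ej.2 = j + 1 := by rw [hej, hjj]
      rw [hej2]
    · simp [i2]
    · rw [hsums', List.length_set, i3]
    · show (pvHeappush R np).Perm (pvM _)
      rw [hsums', pvM_set sums j' _ hj'lt]
      have hMe : (pvM sums).Perm (ej :: (pvM sums).eraseIdx j') := by
        have hjM : j' < (pvM sums).length := by rw [pvM_length]; exact hj'lt
        have := (List.getElem_cons_eraseIdx_perm hjM).symm
        rwa [pvM_getElem sums j' hj'lt, ← hej] at this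
      have hRperm : R.Perm ((pvM sums).eraseIdx j') :=
        List.Perm.cons_inv ((e2.symm.trans i4).trans hMe)
      have hset : ((pvM sums).set j' (sums.getD j' 0 + hv, (j' : Int) + 1)).Perm
          (np :: (pvM sums).eraseIdx j') := by
        have := pv_set_perm_cons_eraseIdx (pvM sums) j' np (by rw [pvM_length]; exact hj'lt)
        rwa [hnp, hej] at this
      exact (u1.trans (List.Perm.cons np hRperm)).trans hset.symm
    · exact u3

-- ---- main coupling ----
theorem pv_main (n m : Int) (h_ : List Int) (hm : 1 ≤ m) :
    (((PySem.List.pyRange 0 n 1).foldl (pvStepA h_)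
        (List.replicate n.toNat (0 : Int),
         pvHeapify ((PySem.List.pyRange 0 m 1).map (fun i => ((0 : Int), i + 1))))).1) =
    (((PySem.List.pyRange 0 n 1).foldl (pvStepB h_ m)
        ([], List.replicate m.toNat (0 : Int)))).1 := by
  have hconv : PySem.List.pyRange 0 n 1 = (List.range n.toNat).map (fun k => ((k : Nat) : Int)) := by
    rw [PySem.List.pyRange_one]
    simp
  rw [hconv, List.foldl_map, List.foldl_map]
  obtain ⟨i1, _, _, _, _⟩ := pv_loop n m h_ hm n.toNat (le_refl _)
  rw [pvA, pvB] at i1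
  rw [i1]
  simp

-- ===== VERDICT =====
theorem solve_phoenix_py_spec : Claim_equal_solve_phoenix_py := by
  intro n m x h_ _hdom hpre
  unfold Spec_solve_phoenix_py solve_phoenix_py solve_phoenix_py_alt
  by_cases hnm : n = m
  · simp [hnm]
  · simp only [if_neg hnm]
    by_cases hn : 0 < n
    · have hm : 1 ≤ m := by
        rcases hpre with h | h | h
        · exact absurd h hnm
        · omega
        · exact h.1
      exact pv_main n m h_ hm
    · have hn0 : n ≤ 0 := by omega
      have hr : PySem.List.pyRange 0 n 1 = [] := PySem.List.pyRange_one_eq_nil (by omega)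
      rw [hr]
      simp [Int.toNat_of_nonpos hn0]
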